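-- pv_equiv track=rewrite | github.com/Vip3rLi0n/HEx-Renewed | cron/endRound.py | dot_version
-- ===== SOURCE A (Python) =====
-- def dot_version(soft_version):
--     length = len(soft_version)
--     if length == 1:
--         str_edit = '0' + soft_version
--     elif length == 2:
--         str_edit = [soft_version[i:i+1] for i in range(length)]
--     elif length == 3:
--         str_edit = [soft_version[i:i+2] for i in range(length)]
--     elif length == 4:
--         str_edit = [soft_version[i:i+3] for i in range(length)]
--     elif length == 5:
--         str_edit = [soft_version[i:i+4] for i in range(length)]
--     elif length == 6:
--         str_edit = [soft_version[i:i+5] for i in range(length)]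
--     elif length == 7:
--         str_edit = [soft_version[i:i+6] for i in range(length)]
--     elif length == 8:
--         str_edit = [soft_version[i:i+7] for i in range(length)]
--     else:
--         raise ValueError("Error at finishRound.py!")
--
--     str_return = f"{str_edit[0]}.{str_edit[1]}"
--     return str_return
-- ===== SOURCE B (Python) =====
-- def dot_version(soft_version):
--     length = len(soft_version)
--     if length == 1:
--         return '0.' + soft_version
--     if 2 <= length <= 8:
--         return f"{soft_version[:length-1]}.{soft_version[1:]}"
--     raise ValueError("Error at finishRound.py!")
-- ===== Notes on version B (the rewrite author's own statement) =====
-- stated objective: simpler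
-- what changed: Replaces the eight-way length dispatch that builds a full list of window slices with one closed-form return joining the prefix of length len-1 and the suffix from index 1 with a dot, keeping only the length-one special case and the same ValueError otherwise.
import Mathlib
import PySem

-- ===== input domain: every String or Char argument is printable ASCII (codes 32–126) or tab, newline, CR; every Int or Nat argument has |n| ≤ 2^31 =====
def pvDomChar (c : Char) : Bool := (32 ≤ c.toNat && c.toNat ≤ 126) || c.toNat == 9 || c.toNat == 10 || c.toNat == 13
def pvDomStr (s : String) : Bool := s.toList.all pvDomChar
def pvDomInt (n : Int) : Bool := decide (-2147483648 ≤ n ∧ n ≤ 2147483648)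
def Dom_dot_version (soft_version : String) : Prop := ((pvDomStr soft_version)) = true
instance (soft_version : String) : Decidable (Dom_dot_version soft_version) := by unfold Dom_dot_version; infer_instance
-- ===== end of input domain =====

-- B replaces A's eight-way length dispatch (which builds a whole list of window slices)
-- with one closed-form slice expression; objective: simpler.

-- ===== PORT A =====
-- str_edit = [soft_version[i:i+k] for i in range(length)] for one window width k
def pvEditA (cs : List Char) (length k : Int) : List (List Char) :=
  (PySem.List.pyRange 0 length 1).map (fun i => PySem.List.slice cs (some i) (some (i + k)))

-- f"{str_edit[0]}.{str_edit[1]}" for the list branches (indexing in range on Pre_)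
def pvJoinA (strEdit : List (List Char)) : String :=
  String.ofList (PySem.List.pyGetD strEdit 0 [] ++ '.' :: PySem.List.pyGetD strEdit 1 [])

def dot_version (soft_version : String) : String :=
  let cs := soft_version.toList
  let length : Int := PySem.Str.len soft_version
  if length = 1 then
    -- str_edit = '0' + soft_version (a string); f"{str_edit[0]}.{str_edit[1]}"
    let strEdit := '0' :: cs
    String.ofList (PySem.List.pyGetD strEdit 0 ' ' :: '.' :: [PySem.List.pyGetD strEdit 1 ' '])
  else if length = 2 then pvJoinA (pvEditA cs length 1)
  else if length = 3 then pvJoinA (pvEditA cs length 2)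
  else if length = 4 then pvJoinA (pvEditA cs length 3)
  else if length = 5 then pvJoinA (pvEditA cs length 4)
  else if length = 6 then pvJoinA (pvEditA cs length 5)
  else if length = 7 then pvJoinA (pvEditA cs length 6)
  else if length = 8 then pvJoinA (pvEditA cs length 7)
  else ""  -- Python raises ValueError here; excluded by Pre_

-- ===== PORT B =====
def dot_version_alt (soft_version : String) : String :=
  let cs := soft_version.toList
  let length : Int := PySem.Str.len soft_version
  if length = 1 then
    String.ofList ('0' :: '.' :: cs)
  else if 2 ≤ length ∧ length ≤ 8 then
    String.ofList (PySem.List.slice cs none (some (length - 1)) ++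
                   '.' :: PySem.List.slice cs (some 1) none)
  else ""  -- Python raises ValueError here; excluded by Pre_

-- ===== PRECONDITION & SPEC =====
-- A raises ValueError unless 1 <= len(soft_version) <= 8; Pre_ admits exactly the returning inputs.
def Pre_dot_version (soft_version : String) : Prop :=
  1 ≤ soft_version.toList.length ∧ soft_version.toList.length ≤ 8
instance (soft_version : String) : Decidable (Pre_dot_version soft_version) := by
  unfold Pre_dot_version; infer_instance
def pvWitness_dot_version : String := "123"
def Spec_dot_version (soft_version : String) (out : String) : Prop := out = dot_version_alt soft_version
instance (soft_version : String) (out : String) : Decidable (Spec_dot_version soft_version out) := by unfold Spec_dot_version; infer_instance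

-- ===== CLAIM (what is proved, stated in full; the proofs are below) =====
def Claim_equal_dot_version : Prop := ∀ (soft_version : String), Dom_dot_version soft_version → Pre_dot_version soft_version → Spec_dot_version soft_version (dot_version soft_version)

-- ===== LEMMAS AND PROOFS =====
theorem dot_version_agree (s : String) (h1 : 1 ≤ s.toList.length) (h2 : s.toList.length ≤ 8) :
    dot_version s = dot_version_alt s := by
  obtain ⟨cs, rfl⟩ : ∃ cs, s = String.ofList cs := ⟨s.toList, String.ofList_toList.symm⟩
  simp only [String.toList_ofList] at h1 h2
  unfold dot_version dot_version_alt pvJoinA pvEditA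
  simp only [String.toList_ofList, PySem.Str.len_eq, String.toList_ofList]
  interval_cases h : cs.length <;>
    [(match cs, h with | [a], _ => rfl);
     (match cs, h with | [a,b], _ => rfl);
     (match cs, h with | [a,b,c], _ => rfl);
     (match cs, h with | [a,b,c,d], _ => rfl);
     (match cs, h with | [a,b,c,d,e], _ => rfl);
     (match cs, h with | [a,b,c,d,e,f], _ => rfl);
     (match cs, h with | [a,b,c,d,e,f,g], _ => rfl);
     (match cs, h with | [a,b,c,d,e,f,g,j], _ => rfl)]

-- ===== VERDICT (by name: the statement is the Claim_ definition above) =====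
theorem dot_version_spec : Claim_equal_dot_version := by
  intro s _ hpre
  exact dot_version_agree s hpre.1 hpre.2
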